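-- pv_equiv track=rewrite | github.com/MoonshotAI/kimi-cli | src/kimi_cli/tools/file/check_fmt.py | _check_code_fence_balance
-- ===== SOURCE A (Python) =====
-- def _check_code_fence_balance(lines: list[str]) -> list[str]:
--     """Check if code fences (```) are properly balanced."""
--     errors: list[str] = []
--     in_code_block = False
--     fence_info = None  # (line_num, col_num) of opening fence
--
--     for line_idx, line in enumerate(lines, start=1):
--         stripped = line.lstrip()
--
--         # Check for code fence
--         if stripped.startswith('```'):
--             if not in_code_block:
--                 in_code_block = True
--                 col = line.index('```') + 1
--                 fence_info = (line_idx, col)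
--             else:
--                 in_code_block = False
--                 fence_info = None
--
--     if in_code_block and fence_info:
--         errors.append(
--             f"Markdown validation error at line {fence_info[0]}, column {fence_info[1]}: Unclosed code fence")
--
--     return errors
-- ===== SOURCE B (Python) =====
-- def _check_code_fence_balance(lines: list[str]) -> list[str]:
--     """Check if code fences (```) are properly balanced."""
--     fences = [(i, line.index('```') + 1)
--               for i, line in enumerate(lines, start=1)
--               if line.lstrip().startswith('```')]
--     if len(fences) % 2 == 1:
--         ln, col = fences[-1]
--         return [f"Markdown validation error at line {ln}, column {col}: Unclosed code fence"]
--     return []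
-- ===== Notes on version B (the rewrite author's own statement) =====
-- stated objective: simpler
-- what changed: Replaces the stateful in_code_block/fence_info toggle loop with a collect-all-fence-positions comprehension followed by a single parity check on the count, reporting the last fence if the count is odd.
import Mathlib
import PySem

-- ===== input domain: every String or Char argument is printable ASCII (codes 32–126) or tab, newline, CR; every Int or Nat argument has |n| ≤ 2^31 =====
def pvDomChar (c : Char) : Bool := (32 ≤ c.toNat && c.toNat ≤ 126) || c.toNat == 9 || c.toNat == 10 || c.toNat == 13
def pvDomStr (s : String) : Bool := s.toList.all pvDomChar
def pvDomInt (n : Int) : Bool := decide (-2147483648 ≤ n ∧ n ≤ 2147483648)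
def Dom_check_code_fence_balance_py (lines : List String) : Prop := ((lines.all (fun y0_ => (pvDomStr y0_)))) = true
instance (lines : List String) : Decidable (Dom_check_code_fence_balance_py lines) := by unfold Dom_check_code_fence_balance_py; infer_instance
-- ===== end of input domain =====

-- B replaces A's stateful in_code_block/fence_info toggle with a collect-then-parity-check decomposition (objective: simpler).

-- ===== PORT A =====
-- the f-string error message
def pvFenceMsg (l c : Int) : String :=
  "Markdown validation error at line " ++ PySem.Int.toStr l ++ ", column " ++ PySem.Int.toStr c ++ ": Unclosed code fence"

-- loop body of A: state = (in_code_block, fence_info)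
def pvStepA (acc : Bool × Option (Int × Int)) (p : Int × String) : Bool × Option (Int × Int) :=
  if PySem.Str.startswith (PySem.Str.lstrip p.2) "```" then
    if !acc.1 then (true, some (p.1, PySem.Str.find p.2 "```" + 1))
    else (false, none)
  else acc

def check_code_fence_balance_py (lines : List String) : List String :=
  let st := (PySem.List.enumerate lines 1).foldl pvStepA (false, none)
  match st with
  | (true, some (l, c)) => [pvFenceMsg l c]
  | _ => []

-- ===== PORT B =====
-- the comprehension: positions (line, col) of all fence lines
def pvFences (l : List (Int × String)) : List (Int × Int) :=
  (l.filter (fun p => PySem.Str.startswith (PySem.Str.lstrip p.2) "```")).map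
    (fun p => (p.1, PySem.Str.find p.2 "```" + 1))

def check_code_fence_balance_py_alt (lines : List String) : List String :=
  let fences := pvFences (PySem.List.enumerate lines 1)
  if fences.length % 2 = 1 then
    match fences.getLast? with
    | some (l, c) => [pvFenceMsg l c]
    | none => []
  else []

-- ===== PRECONDITION & SPEC =====
def Spec_check_code_fence_balance_py (lines : List String) (out : List String) : Prop := out = check_code_fence_balance_py_alt lines
instance (lines : List String) (out : List String) : Decidable (Spec_check_code_fence_balance_py lines out) := by unfold Spec_check_code_fence_balance_py; infer_instance

-- ===== CLAIM (what is proved, stated in full; the proofs are below) =====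
def Claim_equal_check_code_fence_balance_py : Prop := ∀ (lines : List String), Dom_check_code_fence_balance_py lines → Spec_check_code_fence_balance_py lines (check_code_fence_balance_py lines)

-- ===== LEMMAS AND PROOFS =====

-- A's loop invariant: the final state is determined by the list of collected fences.
-- From any state, the final in_code_block is the initial one xor the fence-count parity,
-- and fence_info is the last fence iff the final flag is true (untouched if no fences).
theorem pvLoopA (l : List (Int × String)) (b : Bool) (fi : Option (Int × Int)) :
    l.foldl pvStepA (b, fi) =
      (xor b (decide ((pvFences l).length % 2 = 1)),
       if (pvFences l).isEmpty then fi
       else if xor b (decide ((pvFences l).length % 2 = 1)) then (pvFences l).getLast? else none) := by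
  induction l generalizing b fi with
  | nil => simp [pvFences]
  | cons x xs ih =>
    by_cases h : PySem.Str.startswith (PySem.Str.lstrip x.2) "```" = true
    · have hf : pvFences (x :: xs) = (x.1, PySem.Str.find x.2 "```" + 1) :: pvFences xs := by
        simp only [pvFences, List.filter_cons, h, if_pos, List.map_cons]
      cases b with
      | false =>
        simp only [List.foldl_cons, pvStepA, h, if_pos, Bool.not_false, hf]
        rw [ih]
        rcases hfx : pvFences xs with _ | ⟨y, ys⟩
        · simp
        · by_cases hp : (y :: ys).length % 2 = 1
          · have e1 : (ys.length + 1) % 2 = 1 := by simpa using hp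
            have e2 : (ys.length + 1 + 1) % 2 = 0 := by omega
            simp [e1, e2]
          · have e1 : (ys.length + 1) % 2 = 0 := by simp at hp; omega
            have e2 : (ys.length + 1 + 1) % 2 = 1 := by omega
            simp [e1, e2]
      | true =>
        simp only [List.foldl_cons, pvStepA, h, if_pos, Bool.not_true, hf]
        rw [ih]
        rcases hfx : pvFences xs with _ | ⟨y, ys⟩
        · simp
        · by_cases hp : (y :: ys).length % 2 = 1
          · have e1 : (ys.length + 1) % 2 = 1 := by simpa using hp
            have e2 : (ys.length + 1 + 1) % 2 = 0 := by omega
            simp [e1, e2]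
          · have e1 : (ys.length + 1) % 2 = 0 := by simp at hp; omega
            have e2 : (ys.length + 1 + 1) % 2 = 1 := by omega
            simp [e1, e2]
    · have hf : pvFences (x :: xs) = pvFences xs := by
        simp only [pvFences, List.filter_cons]
        rw [if_neg h]
      simp only [List.foldl_cons, pvStepA, hf]
      rw [if_neg h]
      exact ih b fi

-- ===== VERDICT (by name: the statement is the Claim_ definition above) =====
theorem check_code_fence_balance_py_spec : Claim_equal_check_code_fence_balance_py := by
  intro lines _
  unfold Spec_check_code_fence_balance_py check_code_fence_balance_py check_code_fence_balance_py_alt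
  rw [pvLoopA]
  rcases hfx : pvFences (PySem.List.enumerate lines 1) with _ | ⟨y, ys⟩
  · simp
  · by_cases hp : (y :: ys).length % 2 = 1
    · simp only [hp, if_pos, List.isEmpty_cons, Bool.false_xor, decide_true]
      rcases hgl : (y :: ys).getLast? with _ | ⟨l, c⟩
      · simp at hgl
      · simp
    · have hq : ¬ (ys.length + 1) % 2 = 1 := by simpa using hp
      simp [hq]
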